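-- pv_equiv track=rewrite | github.com/NickleDave/ALIFexNet | src/alifexnet/convert/utils.py | layer_depths
-- ===== SOURCE A (Python) =====
-- def layer_depths(layers):
--     """determine depth of layer in network
--
--     Parameters
--     ----------
--     layers : dict
--         where key is layer name and value is dictionary of metadata
--     """
--     depths = {}
--
--     def get_depth(name):
--         """recursively iterate through a layers' inputs and inputs to those
--         inputs, etc., to determine the first layer's level in a stack of
--         layers"""
--         # if this layer is already in depths, just return its depth
--         if name in depths:
--             return depths[name]
--
--         # return this layer's inputs, or an empty list
--         inputs = layers[name].get('inputs', [])
--         # apply get_depth to inputs and find max (or return 0 if no inputs)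
--         depth = max(get_depth(i) for i in inputs) + 1 if len(inputs) > 0 else 0
--         depths[name] = depth
--         return depth
--
--     for name in layers:
--         get_depth(name)
--
--     return depths
-- ===== SOURCE B (Python) =====
-- def layer_depths(layers):
--     """determine depth of layer in network
--
--     Iterative re-implementation: explicit-stack DFS instead of recursion,
--     with a pending-inputs worklist; same depths dict as the recursive version.
--     """
--     depths = {}
--     for root in layers:
--         stack = [root]
--         while stack:
--             name = stack[-1]
--             if name in depths:
--                 stack.pop()
--                 continue
--             inputs = layers[name].get('inputs', [])
--             pending = [i for i in inputs if i not in depths]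
--             if pending:
--                 stack.extend(reversed(pending))
--             else:
--                 depth = -1
--                 for i in inputs:
--                     depth = max(depth, depths[i])
--                 depths[name] = depth + 1
--                 stack.pop()
--     return depths
-- ===== Notes on version B (the rewrite author's own statement) =====
-- stated objective: alternative
-- what changed: A's memoized recursive get_depth (nested function, recursion over inputs with a max-generator) is replaced by an explicit-stack iterative DFS: a worklist loop that re-examines the stack top, pushes the not-yet-resolved inputs (pending) and finalizes a layer with a running max over stored depths once all its inputs are resolved.
import Mathlib
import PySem

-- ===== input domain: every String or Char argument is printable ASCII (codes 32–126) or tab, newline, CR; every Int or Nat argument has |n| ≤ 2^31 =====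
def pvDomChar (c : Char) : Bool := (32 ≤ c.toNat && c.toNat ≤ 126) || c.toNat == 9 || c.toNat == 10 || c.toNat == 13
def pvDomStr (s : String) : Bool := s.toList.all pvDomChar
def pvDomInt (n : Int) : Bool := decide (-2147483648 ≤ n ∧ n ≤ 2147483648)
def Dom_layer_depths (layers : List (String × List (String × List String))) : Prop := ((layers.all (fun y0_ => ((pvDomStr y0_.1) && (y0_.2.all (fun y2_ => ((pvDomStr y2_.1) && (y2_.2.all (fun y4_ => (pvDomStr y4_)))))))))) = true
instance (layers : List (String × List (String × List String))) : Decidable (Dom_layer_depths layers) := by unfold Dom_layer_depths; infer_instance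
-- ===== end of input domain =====

-- B replaces A's memoized recursion by an explicit-stack iterative DFS with a pending-inputs
-- worklist (objective: alternative decomposition, same cost; same return value).

-- ===== PORT A =====
-- layers[name].get('inputs', []).  Python raises KeyError when name is not a key of layers;
-- Pre_ excludes those inputs, the port totalizes the lookup with [].
def pvInputs (layers : List (String × List (String × List String))) (name : String) : List String :=
  PySem.Dict.getD (PySem.Dict.mk ((PySem.Dict.mk layers).getD name [])) "inputs" []

-- get_depth, fuel-totalized (Python recursion; on a cyclic graph Python raises RecursionError,
-- excluded by Pre_; fuel layers.length + 1 is enough on every input Pre_ admits).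
mutual
def pvGetDepthA (layers : List (String × List (String × List String))) :
    Nat → String → PySem.Dict String Int → Int × PySem.Dict String Int
  | 0, _, depths => (0, depths)
  | fuel + 1, name, depths =>
    match PySem.Dict.get? depths name with
    | some v => (v, depths)
    | none =>
      let inputs := pvInputs layers name
      if inputs.isEmpty then (0, depths.insert name 0)
      else
        let r := pvGetDepthAList layers fuel inputs depths
        let m := (PySem.List.max? r.1 (fun v => v)).getD 0
        (m + 1, r.2.insert name (m + 1))
  termination_by fuel _ _ => (fuel, 0)
  decreasing_by all_goals simp_wf <;> omega
-- the generator (get_depth(i) for i in inputs), consumed in order by max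
def pvGetDepthAList (layers : List (String × List (String × List String))) :
    Nat → List String → PySem.Dict String Int → List Int × PySem.Dict String Int
  | _, [], depths => ([], depths)
  | fuel, i :: rest, depths =>
    let r1 := pvGetDepthA layers fuel i depths
    let r2 := pvGetDepthAList layers fuel rest r1.2
    (r1.1 :: r2.1, r2.2)
  termination_by fuel l _ => (fuel, l.length + 1)
  decreasing_by all_goals simp_wf <;> omega
end

def layer_depths (layers : List (String × List (String × List String))) : List (String × Int) :=
  (layers.foldl (fun depths p => (pvGetDepthA layers (layers.length + 1) p.1 depths).2)
    PySem.Dict.empty).items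

-- ===== PORT B =====
-- fuel bound for B's while-loop (the Python loop has none; this bound suffices under Pre_)
def pvItot (layers : List (String × List (String × List String))) : Nat :=
  (layers.map (fun p => (PySem.Dict.getD (PySem.Dict.mk p.2) "inputs" []).length)).sum

def pvFuelB (layers : List (String × List (String × List String))) : Nat → Nat
  | 0 => 1
  | f + 1 => 2 + pvItot layers * pvFuelB layers f

-- the while-loop of B; stack head = top of Python's stack; depths[i] totalized with 0
-- (under Pre_ the pending-empty branch only reads keys present in depths)
def pvLoopB (layers : List (String × List (String × List String))) :
    Nat → List String → PySem.Dict String Int → PySem.Dict String Int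
  | 0, _, depths => depths
  | _ + 1, [], depths => depths
  | fuel + 1, name :: stack, depths =>
    if PySem.Dict.contains depths name then pvLoopB layers fuel stack depths
    else
      let inputs := pvInputs layers name
      let pending := inputs.filter (fun i => !PySem.Dict.contains depths i)
      if pending.isEmpty then
        let depth := inputs.foldl (fun m i => max m (PySem.Dict.getD depths i 0)) (-1) + 1
        pvLoopB layers fuel stack (depths.insert name depth)
      else pvLoopB layers fuel (pending ++ name :: stack) depths

def layer_depths_alt (layers : List (String × List (String × List String))) : List (String × Int) :=
  (layers.foldl (fun depths p => pvLoopB layers (pvFuelB layers layers.length) [p.1] depths)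
    PySem.Dict.empty).items

-- ===== PRECONDITION & SPEC =====
-- stratification: pvElim layers f = the layer names eliminated within f rounds of removing
-- layers all of whose inputs are already removed
def pvElim (layers : List (String × List (String × List String))) : Nat → List String
  | 0 => []
  | f + 1 => (layers.map Prod.fst).filter
      (fun k => decide (k ∈ pvElim layers f) ||
        (pvInputs layers k).all (fun i => decide (i ∈ pvElim layers f)))

-- Pre_: (a) keys are distinct (layers is a Python dict, so duplicate keys cannot occur);
-- (b) every layer is eliminated within n rounds — exactly "the layer graph is closed and
-- acyclic", i.e. exactly the inputs on which A returns: A raises KeyError when a transitive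
-- input name is missing from layers, and RecursionError on a cyclic graph.
def Pre_layer_depths (layers : List (String × List (String × List String))) : Prop :=
  (layers.map Prod.fst).Nodup ∧
  ∀ k ∈ layers.map Prod.fst, k ∈ pvElim layers layers.length
instance (layers : List (String × List (String × List String))) : Decidable (Pre_layer_depths layers) := by
  unfold Pre_layer_depths; infer_instance

def pvWitness_layer_depths : (List (String × List (String × List String))) :=
  [("in", [("inputs", [])]), ("h1", [("inputs", ["in"])]), ("out", [("inputs", ["h1", "in"])])]

def Spec_layer_depths (layers : List (String × List (String × List String))) (out : List (String × Int)) : Prop := out = layer_depths_alt layers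
instance (layers : List (String × List (String × List String))) (out : List (String × Int)) : Decidable (Spec_layer_depths layers out) := by unfold Spec_layer_depths; infer_instance

-- ===== CLAIM (what is proved, stated in full; the proofs are below) =====
def Claim_equal_layer_depths : Prop := ∀ (layers : List (String × List (String × List String))), Dom_layer_depths layers → Pre_layer_depths layers → Spec_layer_depths layers (layer_depths layers)

-- ===== LEMMAS AND PROOFS =====

-- dict invariant maintained by both programs: distinct keys, nonnegative stored depths
def pvInv (d : PySem.Dict String Int) : Prop :=
  d.keys.Nodup ∧ ∀ p ∈ d.items, 0 ≤ p.2

-- A's depth-threading fold over a list of names (the d-evolution of the input generator)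
def pvThread (layers : List (String × List (String × List String))) (f : Nat)
    (is : List String) (d : PySem.Dict String Int) : PySem.Dict String Int :=
  is.foldl (fun dd i => (pvGetDepthA layers f i dd).2) d

theorem pvInv_empty : pvInv (PySem.Dict.empty : PySem.Dict String Int) := by
  constructor <;> simp [PySem.Dict.empty, PySem.Dict.keys]

-- ---- small dict facts (persistence along item-list extension) ----

theorem pvGet?_persist (d d' : PySem.Dict String Int) (ext : List (String × Int))
    (h : d'.items = d.items ++ ext) {k : String} {v : Int} (hk : d.get? k = some v) :
    d'.get? k = some v := by
  simp only [PySem.Dict.get?] at hk ⊢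
  rw [h, List.find?_append]
  cases hfind : List.find? (fun p => p.1 == k) d.items with
  | none => rw [hfind] at hk; simp at hk
  | some p => rw [hfind] at hk; simpa using hk

theorem pvContains_persist (d d' : PySem.Dict String Int) (ext : List (String × Int))
    (h : d'.items = d.items ++ ext) {k : String} (hk : d.contains k = true) :
    d'.contains k = true := by
  simp only [PySem.Dict.contains] at hk ⊢
  rw [h, List.any_append, hk]
  simp

theorem pvContains_fresh (d d' : PySem.Dict String Int) (ext : List (String × Int))
    (h : d'.items = d.items ++ ext) {k : String} (hd : d.contains k = false)
    (hext : ∀ p ∈ ext, p.1 ≠ k) : d'.contains k = false := by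
  simp only [PySem.Dict.contains] at hd ⊢
  rw [h, List.any_append, hd]
  simp only [Bool.false_or, List.any_eq_false]
  intro p hp
  simpa using hext p hp

theorem pvContains_false_get? (d : PySem.Dict String Int) {k : String}
    (h : PySem.Dict.get? d k = none) : d.contains k = false := by
  rw [PySem.Dict.contains_eq_isSome_get?, h]; rfl

theorem pvContains_true_get? (d : PySem.Dict String Int) {k : String} {v : Int}
    (h : PySem.Dict.get? d k = some v) : d.contains k = true := by
  rw [PySem.Dict.contains_eq_isSome_get?, h]; rfl

theorem pvInv_getD_nonneg (d : PySem.Dict String Int) (hInv : pvInv d) (k : String) :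
    0 ≤ d.getD k 0 := by
  cases hget : d.get? k with
  | none => rw [PySem.Dict.getD_of_get?_eq_none d 0 hget]
  | some v =>
    rw [PySem.Dict.getD_of_get?_eq_some d 0 hget]
    exact hInv.2 _ (PySem.Dict.mem_items_of_get?_eq_some d hget)

theorem pvInv_insert (d : PySem.Dict String Int) (hInv : pvInv d) (k : String) (v : Int)
    (hk : d.contains k = false) (hv : 0 ≤ v) : pvInv (d.insert k v) := by
  constructor
  · rw [PySem.Dict.keys_insert_of_not_contains d v hk]
    refine List.Nodup.append hInv.1 (List.nodup_singleton k) ?_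
    intro a ha hb
    simp only [List.mem_singleton] at hb
    subst hb
    exact absurd ((PySem.Dict.contains_iff_mem_keys d a).mpr ha) (by simp [hk])
  · intro p hp
    rcases (PySem.Dict.mem_items_insert _ _ _ _).mp hp with hpe | ⟨hpi, _⟩
    · subst hpe; exact hv
    · exact hInv.2 _ hpi

-- ---- stratification facts ----

theorem pvElim_subset (layers : List (String × List (String × List String))) (f : Nat)
    (k : String) (hk : k ∈ pvElim layers f) : k ∈ layers.map Prod.fst := by
  cases f with
  | zero => simp [pvElim] at hk
  | succ f => exact (List.mem_filter.mp hk).1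

theorem pvElim_succ_iff (layers : List (String × List (String × List String))) (f : Nat)
    (k : String) : k ∈ pvElim layers (f + 1) ↔
      k ∈ layers.map Prod.fst ∧
        (k ∈ pvElim layers f ∨ ∀ i ∈ pvInputs layers k, i ∈ pvElim layers f) := by
  simp [pvElim, List.mem_filter, List.all_eq_true]

theorem pvElim_mono (layers : List (String × List (String × List String))) (f : Nat)
    (k : String) (hk : k ∈ pvElim layers f) : k ∈ pvElim layers (f + 1) :=
  (pvElim_succ_iff layers f k).mpr ⟨pvElim_subset layers f k hk, Or.inl hk⟩

theorem pvElim_pos (layers : List (String × List (String × List String))) (f : Nat)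
    (k : String) (hk : k ∈ pvElim layers f) : 1 ≤ f := by
  cases f with
  | zero => simp [pvElim] at hk
  | succ f => omega

theorem pvFuelB_pos (layers : List (String × List (String × List String))) (f : Nat) :
    1 ≤ pvFuelB layers f := by
  cases f <;> simp [pvFuelB] <;> omega

theorem pvFuelB_mono (layers : List (String × List (String × List String))) :
    ∀ f, pvFuelB layers f ≤ pvFuelB layers (f + 1) := by
  intro f
  induction f with
  | zero => simp [pvFuelB]; omega
  | succ f ih =>
    show 2 + pvItot layers * pvFuelB layers f ≤ 2 + pvItot layers * pvFuelB layers (f + 1)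
    exact Nat.add_le_add_left (Nat.mul_le_mul_left _ ih) 2

theorem pvInputs_length_le (layers : List (String × List (String × List String)))
    (name : String) : (pvInputs layers name).length ≤ pvItot layers := by
  unfold pvInputs pvItot
  cases hget : (PySem.Dict.mk layers).get? name with
  | none =>
    rw [PySem.Dict.getD_of_get?_eq_none _ ([]) hget]
    simp [PySem.Dict.getD, PySem.Dict.get?]
  | some md =>
    rw [PySem.Dict.getD_of_get?_eq_some _ ([]) hget]
    simp only [PySem.Dict.get?] at hget
    obtain ⟨p, hfind, hp2⟩ := Option.map_eq_some_iff.mp hget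
    have hmem : p ∈ layers := List.mem_of_find?_eq_some hfind
    subst hp2
    exact List.single_le_sum (by simp) _ (List.mem_map.mpr ⟨p, hmem, rfl⟩)

theorem pvLoopB_nil (layers : List (String × List (String × List String))) (fuel : Nat)
    (d : PySem.Dict String Int) : pvLoopB layers fuel [] d = d := by
  cases fuel <;> simp [pvLoopB]

-- memoized call is a no-op
theorem pvGetDepthA_memo (layers : List (String × List (String × List String)))
    (fuel : Nat) (hf : 1 ≤ fuel) (name : String) (d : PySem.Dict String Int) {v : Int}
    (h : PySem.Dict.get? d name = some v) : pvGetDepthA layers fuel name d = (v, d) := by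
  obtain ⟨fl, rfl⟩ : ∃ fl, fuel = fl + 1 := ⟨fuel - 1, by omega⟩
  simp [pvGetDepthA, h]

-- fuel-irrelevance of A's recursion: at stratum f, any fuel ≥ f computes the same result
theorem pvGetDepthA_fuel (layers : List (String × List (String × List String))) :
    ∀ f, ∀ name ∈ pvElim layers f, ∀ fuel, f ≤ fuel → ∀ d,
      pvGetDepthA layers fuel name d = pvGetDepthA layers f name d := by
  intro f
  induction f with
  | zero => intro name hname; simp [pvElim] at hname
  | succ f ih =>
    have ihL : ∀ is : List String, (∀ i ∈ is, i ∈ pvElim layers f) → ∀ fuel, f ≤ fuel → ∀ d,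
        pvGetDepthAList layers fuel is d = pvGetDepthAList layers f is d := by
      intro is
      induction is with
      | nil => intro _ fuel _ d; simp [pvGetDepthAList]
      | cons i rest ihr =>
        intro h fuel hf d
        simp only [pvGetDepthAList]
        rw [ih i (h i (by simp)) fuel hf d,
          ihr (fun j hj => h j (by simp [hj])) fuel hf]
    intro name hname fuel hfuel d
    rcases ((pvElim_succ_iff layers f name).mp hname).2 with hEf | hinp
    · rw [ih name hEf fuel (by omega) d, ih name hEf (f + 1) (by omega) d]
    · obtain ⟨fl, rfl⟩ : ∃ fl, fuel = fl + 1 := ⟨fuel - 1, by omega⟩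
      simp only [pvGetDepthA]
      cases hget : PySem.Dict.get? d name with
      | some v => rfl
      | none =>
        by_cases hemp : (pvInputs layers name).isEmpty
        · simp [hemp]
        · simp only [hemp, Bool.false_eq_true, if_false]
          rw [ihL (pvInputs layers name) hinp fl (by omega) d]

-- structure of A's recursion at stratum f, list form, parametrized by the single-name form
def pvAStructP (layers : List (String × List (String × List String))) (f : Nat) : Prop :=
  ∀ name ∈ pvElim layers f, ∀ d, pvInv d →
    ∃ ext, (pvGetDepthA layers f name d).2.items = d.items ++ ext ∧
      (∀ p ∈ ext, p.1 ∈ pvElim layers f ∧ PySem.Dict.contains d p.1 = false ∧ 0 ≤ p.2) ∧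
      PySem.Dict.get? (pvGetDepthA layers f name d).2 name
        = some (pvGetDepthA layers f name d).1 ∧
      pvInv (pvGetDepthA layers f name d).2

theorem pvGLstruct (layers : List (String × List (String × List String))) (f : Nat)
    (H : pvAStructP layers f) :
    ∀ is : List String, (∀ i ∈ is, i ∈ pvElim layers f) → ∀ d, pvInv d →
      ∃ ext, (pvGetDepthAList layers f is d).2.items = d.items ++ ext ∧
        (∀ p ∈ ext, p.1 ∈ pvElim layers f ∧ PySem.Dict.contains d p.1 = false ∧ 0 ≤ p.2) ∧
        pvInv (pvGetDepthAList layers f is d).2 ∧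
        (pvGetDepthAList layers f is d).1
          = is.map (fun i => (pvGetDepthAList layers f is d).2.getD i 0) ∧
        (∀ i ∈ is, PySem.Dict.contains (pvGetDepthAList layers f is d).2 i = true) := by
  intro is
  induction is with
  | nil =>
    intro _ d hInv
    exact ⟨[], by simp [pvGetDepthAList], by simp, by simpa [pvGetDepthAList] using hInv,
      by simp [pvGetDepthAList], by simp⟩
  | cons i rest ihr =>
    intro his d hInv
    obtain ⟨e1, he1, he1p, hget1, hInv1⟩ := H i (his i (by simp)) d hInv
    obtain ⟨e2, he2, he2p, hInv2, hvals2, hcont2⟩ :=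
      ihr (fun j hj => his j (by simp [hj])) (pvGetDepthA layers f i d).2 hInv1
    simp only [pvGetDepthAList]
    refine ⟨e1 ++ e2, ?_, ?_, hInv2, ?_, ?_⟩
    · rw [he2, he1, List.append_assoc]
    · intro p hp
      rcases List.mem_append.mp hp with hp1 | hp2
      · exact he1p p hp1
      · refine ⟨(he2p p hp2).1, ?_, (he2p p hp2).2.2⟩
        by_contra hc
        have : d.contains p.1 = true := by
          cases h' : PySem.Dict.contains d p.1
          · exact absurd h' hc
          · rfl
        exact absurd (pvContains_persist d _ e1 he1 this) (by simp [(he2p p hp2).2.1])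
    · have hpers : (pvGetDepthAList layers f rest (pvGetDepthA layers f i d).2).2.get? i
          = some (pvGetDepthA layers f i d).1 :=
        pvGet?_persist _ _ e2 he2 hget1
      simp only [List.map_cons]
      rw [PySem.Dict.getD_of_get?_eq_some _ 0 hpers]
      exact congrArg (_ :: ·) hvals2
    · intro j hj
      rcases List.mem_cons.mp hj with rfl | hjr
      · exact pvContains_persist _ _ e2 he2 (pvContains_true_get? _ hget1)
      · exact hcont2 j hjr

theorem pvGetDepthA_struct (layers : List (String × List (String × List String))) :
    ∀ f, pvAStructP layers f := by
  intro f
  induction f with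
  | zero => intro name hname; simp [pvElim] at hname
  | succ f ih =>
    intro name hname d hInv
    by_cases hEf : name ∈ pvElim layers f
    · obtain ⟨ext, h1, h2, h3, h4⟩ := ih name hEf d hInv
      rw [pvGetDepthA_fuel layers f name hEf (f + 1) (by omega) d]
      exact ⟨ext, h1, fun p hp =>
        ⟨pvElim_mono layers f _ (h2 p hp).1, (h2 p hp).2.1, (h2 p hp).2.2⟩, h3, h4⟩
    · have hinp : ∀ i ∈ pvInputs layers name, i ∈ pvElim layers f :=
        (((pvElim_succ_iff layers f name).mp hname).2).resolve_left hEf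
      cases hget : PySem.Dict.get? d name with
      | some v =>
        rw [pvGetDepthA_memo layers (f + 1) (by omega) name d hget]
        exact ⟨[], by simp, by simp, hget, hInv⟩
      | none =>
        have hcF : d.contains name = false := pvContains_false_get? d hget
        by_cases hemp : (pvInputs layers name).isEmpty
        · have hstep : pvGetDepthA layers (f + 1) name d = (0, d.insert name 0) := by
            simp [pvGetDepthA, hget, hemp]
          rw [hstep]
          have hitems := PySem.Dict.items_insert_of_not_contains d (0 : Int) hcF
          refine ⟨[(name, 0)], hitems, ?_, PySem.Dict.get?_insert_self d name 0, ?_⟩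
          · intro p hp
            simp only [List.mem_singleton] at hp
            subst hp
            exact ⟨hname, hcF, le_refl 0⟩
          · exact pvInv_insert d hInv name 0 hcF (le_refl 0)
        · obtain ⟨ext, hitems, hextp, hInvT, hvals, hcontT⟩ :=
            pvGLstruct layers f ih (pvInputs layers name) hinp d hInv
          set r := pvGetDepthAList layers f (pvInputs layers name) d with hr
          set m := (PySem.List.max? r.1 (fun v => v)).getD 0 with hm
          have hstep : pvGetDepthA layers (f + 1) name d = (m + 1, r.2.insert name (m + 1)) := by
            simp only [pvGetDepthA, hget]
            simp [hemp, ← hr, ← hm]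
          have hm0 : 0 ≤ m := by
            have hne : r.1 ≠ [] := by
              intro hnil
              have : (pvInputs layers name).map (fun i => r.2.getD i 0) = [] := by
                rw [← hvals, hnil]
              simp only [List.map_eq_nil_iff] at this
              exact hemp (by simp [this])
            obtain ⟨x, hx⟩ := List.exists_mem_of_ne_nil _ hne
            obtain ⟨mv, hmv⟩ : ∃ mv, PySem.List.max? r.1 (fun v => v) = some mv := by
              cases hq : PySem.List.max? r.1 (fun v => v) with
              | none => exact absurd ((PySem.List.max?_eq_none_iff _ _).mp hq) hne
              | some mv => exact ⟨mv, rfl⟩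
            have hmem := PySem.List.max?_mem hmv
            have : 0 ≤ mv := by
              have := hvals ▸ hmem
              obtain ⟨i, _, hi⟩ := List.mem_map.mp this
              rw [← hi]
              exact pvInv_getD_nonneg r.2 hInvT i
            simpa [hm, hmv] using this
          have hcFT : r.2.contains name = false := by
            refine pvContains_fresh d r.2 ext hitems hcF ?_
            intro p hp heq
            exact hEf (heq ▸ (hextp p hp).1)
          rw [hstep]
          refine ⟨ext ++ [(name, m + 1)], ?_, ?_, ?_, ?_⟩
          · rw [PySem.Dict.items_insert_of_not_contains r.2 (m + 1) hcFT, hitems, List.append_assoc]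
          · intro p hp
            rcases List.mem_append.mp hp with hp1 | hp2
            · exact ⟨pvElim_mono layers f _ (hextp p hp1).1, (hextp p hp1).2.1,
                (hextp p hp1).2.2⟩
            · simp only [List.mem_singleton] at hp2
              subst hp2
              exact ⟨hname, hcF, by omega⟩
          · exact PySem.Dict.get?_insert_self r.2 name (m + 1)
          · exact pvInv_insert r.2 hInvT name (m + 1) hcFT (by omega)

-- dropping already-memoized names from the thread changes nothing
theorem pvThread_filter (layers : List (String × List (String × List String))) (f : Nat) :
    ∀ is : List String, (∀ i ∈ is, i ∈ pvElim layers f) → ∀ d0 d : PySem.Dict String Int, pvInv d →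
      (∀ j, PySem.Dict.contains d0 j = true → PySem.Dict.contains d j = true) →
      pvThread layers f is d
        = pvThread layers f (is.filter (fun i => !PySem.Dict.contains d0 i)) d := by
  intro is
  induction is with
  | nil => intro _ d0 d _ _; simp
  | cons i rest ihr =>
    intro his d0 d hInv hmono
    have hf1 : 1 ≤ f := pvElim_pos layers f i (his i (by simp))
    by_cases h0 : PySem.Dict.contains d0 i = true
    · have hdi : PySem.Dict.contains d i = true := hmono i h0
      have hvs : (PySem.Dict.get? d i).isSome = true := by
        rw [← PySem.Dict.contains_eq_isSome_get?]; exact hdi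
      obtain ⟨v, hv⟩ := Option.isSome_iff_exists.mp hvs
      have hnoop : pvGetDepthA layers f i d = (v, d) := pvGetDepthA_memo layers f hf1 i d hv
      have hfil : (i :: rest).filter (fun i => !PySem.Dict.contains d0 i)
          = rest.filter (fun i => !PySem.Dict.contains d0 i) := by
        simp [List.filter_cons, h0]
      rw [hfil]
      show pvThread layers f rest (pvGetDepthA layers f i d).2 = _
      rw [hnoop]
      exact ihr (fun j hj => his j (by simp [hj])) d0 d hInv hmono
    · have h0' : PySem.Dict.contains d0 i = false := by
        cases h' : PySem.Dict.contains d0 i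
        · rfl
        · exact absurd h' h0
      have hfil : (i :: rest).filter (fun i => !PySem.Dict.contains d0 i)
          = i :: rest.filter (fun i => !PySem.Dict.contains d0 i) := by
        simp [List.filter_cons, h0']
      rw [hfil]
      obtain ⟨e1, he1, _, _, hInv1⟩ :=
        pvGetDepthA_struct layers f i (his i (by simp)) d hInv
      show pvThread layers f rest (pvGetDepthA layers f i d).2
          = pvThread layers f (rest.filter (fun i => !PySem.Dict.contains d0 i))
              (pvGetDepthA layers f i d).2
      exact ihr (fun j hj => his j (by simp [hj])) d0 _ hInv1
        (fun j hj => pvContains_persist d _ e1 he1 (hmono j hj))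

-- the thread over a name list is the d-evolution of A's generator fold
theorem pvThread_eq_gL (layers : List (String × List (String × List String))) (f : Nat) :
    ∀ is : List String, ∀ d, pvThread layers f is d = (pvGetDepthAList layers f is d).2 := by
  intro is
  induction is with
  | nil => intro d; simp [pvThread, pvGetDepthAList]
  | cons i rest ihr =>
    intro d
    show pvThread layers f rest (pvGetDepthA layers f i d).2 = _
    simp only [pvGetDepthAList]
    exact ihr _

-- B's simulation property at stratum f
def pvSimP (layers : List (String × List (String × List String))) (f : Nat) : Prop :=
  ∀ name ∈ pvElim layers f, ∀ d, pvInv d →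
    ∃ c ≤ pvFuelB layers f, ∀ stack fb,
      pvLoopB layers (c + fb) (name :: stack) d
        = pvLoopB layers fb stack (pvGetDepthA layers f name d).2

-- clearing a whole pending block from the stack
theorem pvSeqB (layers : List (String × List (String × List String))) (f : Nat)
    (H : pvSimP layers f) :
    ∀ ps : List String, (∀ p ∈ ps, p ∈ pvElim layers f) → ∀ d, pvInv d →
      ∃ c ≤ ps.length * pvFuelB layers f, ∀ stack fb,
        pvLoopB layers (c + fb) (ps ++ stack) d
          = pvLoopB layers fb stack (pvThread layers f ps d) := by
  intro ps
  induction ps with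
  | nil => intro _ d _; exact ⟨0, by simp, fun stack fb => by simp [pvThread]⟩
  | cons p rest ihr =>
    intro hps d hInv
    obtain ⟨c1, hc1, hsim1⟩ := H p (hps p (by simp)) d hInv
    obtain ⟨e1, he1, _, _, hInv1⟩ := pvGetDepthA_struct layers f p (hps p (by simp)) d hInv
    obtain ⟨c2, hc2, hsim2⟩ := ihr (fun j hj => hps j (by simp [hj])) _ hInv1
    refine ⟨c1 + c2, ?_, ?_⟩
    · have : (p :: rest).length * pvFuelB layers f
          = pvFuelB layers f + rest.length * pvFuelB layers f := by
        simp [List.length_cons, Nat.succ_mul, Nat.add_comm]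
      omega
    · intro stack fb
      have h1 := hsim1 (rest ++ stack) (c2 + fb)
      have h2 := hsim2 stack fb
      calc pvLoopB layers (c1 + c2 + fb) (p :: rest ++ stack) d
          = pvLoopB layers (c1 + (c2 + fb)) (p :: (rest ++ stack)) d := by
            rw [Nat.add_assoc]; rfl
        _ = pvLoopB layers (c2 + fb) (rest ++ stack) (pvGetDepthA layers f p d).2 := h1
        _ = pvLoopB layers fb stack (pvThread layers f rest (pvGetDepthA layers f p d).2) := h2
        _ = pvLoopB layers fb stack (pvThread layers f (p :: rest) d) := rfl

-- running maximum bridge: A's max over the value list = B's fold from -1 over lookups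
theorem pvMax_bridge (g : String → Int) (i0 : String) (tl : List String)
    (hg : 0 ≤ g i0) :
    (PySem.List.max? ((i0 :: tl).map g) (fun v => v)).getD 0
      = (i0 :: tl).foldl (fun m i => max m (g i)) (-1) := by
  rw [← List.foldl_map]
  simp only [List.map_cons, PySem.List.max?_id_cons, Option.getD_some, List.foldl_cons]
  rw [max_eq_right (by omega : (-1 : Int) ≤ g i0)]

-- when every name is already memoized, A's generator fold leaves the dict unchanged
theorem pvGL_all_memo (layers : List (String × List (String × List String))) (f : Nat)
    (hf1 : 1 ≤ f) : ∀ is : List String, ∀ d : PySem.Dict String Int,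
      (∀ i ∈ is, PySem.Dict.contains d i = true) →
      (pvGetDepthAList layers f is d).2 = d := by
  intro is
  induction is with
  | nil => intro d _; simp [pvGetDepthAList]
  | cons i rest ihr =>
    intro d hall
    have hvs : (PySem.Dict.get? d i).isSome = true := by
      rw [← PySem.Dict.contains_eq_isSome_get?]; exact hall i (by simp)
    obtain ⟨v, hv⟩ := Option.isSome_iff_exists.mp hvs
    simp only [pvGetDepthAList]
    rw [pvGetDepthA_memo layers f hf1 i d hv]
    exact ihr d (fun j hj => hall j (by simp [hj]))

-- the simulation: clearing name from the stack top costs ≤ pvFuelB f steps and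
-- leaves exactly A's dict
theorem pvSimB (layers : List (String × List (String × List String))) :
    ∀ f, pvSimP layers f := by
  intro f
  induction f with
  | zero => intro name hname; simp [pvElim] at hname
  | succ f ih =>
    intro name hname d hInv
    by_cases hEf : name ∈ pvElim layers f
    · obtain ⟨c, hc, hsim⟩ := ih name hEf d hInv
      refine ⟨c, le_trans hc (pvFuelB_mono layers f), fun stack fb => ?_⟩
      rw [hsim stack fb, pvGetDepthA_fuel layers f name hEf (f + 1) (by omega) d]
    · have hinp : ∀ i ∈ pvInputs layers name, i ∈ pvElim layers f :=
        (((pvElim_succ_iff layers f name).mp hname).2).resolve_left hEf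
      cases hget : PySem.Dict.get? d name with
      | some v =>
        refine ⟨1, pvFuelB_pos layers (f + 1), fun stack fb => ?_⟩
        have hcT : PySem.Dict.contains d name = true := pvContains_true_get? d hget
        rw [pvGetDepthA_memo layers (f + 1) (by omega) name d hget]
        show pvLoopB layers (1 + fb) (name :: stack) d = pvLoopB layers fb stack d
        rw [Nat.add_comm 1 fb]
        simp [pvLoopB, hcT]
      | none =>
        have hcF : PySem.Dict.contains d name = false := pvContains_false_get? d hget
        by_cases hemp : (pvInputs layers name).isEmpty
        · refine ⟨1, pvFuelB_pos layers (f + 1), fun stack fb => ?_⟩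
          have hstepA : pvGetDepthA layers (f + 1) name d = (0, d.insert name 0) := by
            simp [pvGetDepthA, hget, hemp]
          rw [hstepA]
          show pvLoopB layers (1 + fb) (name :: stack) d = _
          rw [Nat.add_comm 1 fb]
          have hinps : pvInputs layers name = [] := by
            simpa [List.isEmpty_iff] using hemp
          simp [pvLoopB, hcF, hinps]
        · set pending := (pvInputs layers name).filter
            (fun i => !PySem.Dict.contains d i) with hpend
          obtain ⟨ext, hitems, hextp, hInvT, hvals, hcontT⟩ :=
            pvGLstruct layers f (pvGetDepthA_struct layers f) (pvInputs layers name) hinp d hInv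
          set r := pvGetDepthAList layers f (pvInputs layers name) d with hr
          set m := (PySem.List.max? r.1 (fun v => v)).getD 0 with hm
          have hstepA : pvGetDepthA layers (f + 1) name d = (m + 1, r.2.insert name (m + 1)) := by
            simp only [pvGetDepthA, hget]
            simp [hemp, ← hr, ← hm]
          obtain ⟨i0, tl, hin⟩ : ∃ i0 tl, pvInputs layers name = i0 :: tl := by
            cases hcase : pvInputs layers name with
            | nil => exact absurd (by simp [hcase]) hemp
            | cons a b => exact ⟨a, b, rfl⟩
          -- A's max value = B's fold over the final dict r.2
          have hmB : m = (pvInputs layers name).foldl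
              (fun mm i => max mm (r.2.getD i 0)) (-1) := by
            have := pvMax_bridge (fun i => r.2.getD i 0) i0 tl
              (pvInv_getD_nonneg r.2 hInvT i0)
            rw [hm, hvals, hin, this]
          by_cases hpemp : pending.isEmpty
          · -- every input already memoized: the generator fold is a no-op on d
            have hall : ∀ i ∈ pvInputs layers name, PySem.Dict.contains d i = true := by
              intro i hi
              have hnil : pending = [] := List.isEmpty_iff.mp hpemp
              rw [hpend] at hnil
              have hni := List.filter_eq_nil_iff.mp hnil i hi
              simpa using hni
            have hf1 : 1 ≤ f := pvElim_pos layers f i0 (hinp i0 (by simp [hin]))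
            have hrd : r.2 = d := by
              rw [hr]
              exact pvGL_all_memo layers f hf1 (pvInputs layers name) d hall
            refine ⟨1, pvFuelB_pos layers (f + 1), fun stack fb => ?_⟩
            rw [hstepA]
            show pvLoopB layers (1 + fb) (name :: stack) d = _
            rw [Nat.add_comm 1 fb]
            have hpe : pending = [] := List.isEmpty_iff.mp hpemp
            simp only [pvLoopB, hcF, Bool.false_eq_true, if_false, ← hpend, hpe,
              List.isEmpty_nil, if_true]
            rw [hmB, hrd]
          · -- pending nonempty: expand, clear pending block, then finish name
            have hpsub : ∀ p ∈ pending, p ∈ pvElim layers f := by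
              intro p hp
              exact hinp p (List.mem_of_mem_filter hp)
            obtain ⟨cs, hcs, hseq⟩ := pvSeqB layers f ih pending hpsub d hInv
            have hTpend : pvThread layers f pending d
                = pvThread layers f (pvInputs layers name) d := by
              rw [hpend]
              exact (pvThread_filter layers f (pvInputs layers name) hinp d d hInv
                (fun j hj => hj)).symm
            have hTr : pvThread layers f pending d = r.2 := by
              rw [hTpend, pvThread_eq_gL, hr]
            have hcFT : r.2.contains name = false := by
              refine pvContains_fresh d r.2 ext hitems hcF ?_
              intro p hp heq
              exact hEf (heq ▸ (hextp p hp).1)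
            have hpend2 : (pvInputs layers name).filter
                (fun i => !PySem.Dict.contains r.2 i) = [] := by
              refine List.filter_eq_nil_iff.mpr ?_
              intro i hi
              simp [hcontT i hi]
            refine ⟨cs + 2, ?_, fun stack fb => ?_⟩
            · have h1 : pending.length ≤ pvItot layers :=
                le_trans (List.length_filter_le _ _) (pvInputs_length_le layers name)
              have h2 : pending.length * pvFuelB layers f
                  ≤ pvItot layers * pvFuelB layers f :=
                Nat.mul_le_mul_right _ h1
              show cs + 2 ≤ 2 + pvItot layers * pvFuelB layers f
              omega
            · rw [hstepA]
              have hstep1 : pvLoopB layers (cs + 2 + fb) (name :: stack) d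
                  = pvLoopB layers (cs + (1 + fb)) (pending ++ name :: stack) d := by
                have : cs + 2 + fb = (cs + (1 + fb)) + 1 := by omega
                rw [this]
                have hpne : pending.isEmpty = false := by
                  cases h' : pending.isEmpty
                  · rfl
                  · exact absurd h' hpemp
                simp [pvLoopB, hcF, ← hpend, hpne]
              rw [hstep1, hseq (name :: stack) (1 + fb), hTr]
              rw [Nat.add_comm 1 fb]
              simp only [pvLoopB, hcFT, Bool.false_eq_true, if_false, hpend2,
                List.isEmpty_nil, if_true]
              rw [hmB]

-- the per-root folds of the two programs agree
theorem pvFoldEq (layers : List (String × List (String × List String)))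
    (hpre : Pre_layer_depths layers) :
    ∀ roots : List (String × List (String × List String)),
      (∀ p ∈ roots, p.1 ∈ layers.map Prod.fst) → ∀ d, pvInv d →
      roots.foldl (fun depths p =>
          pvLoopB layers (pvFuelB layers layers.length) [p.1] depths) d
        = roots.foldl (fun depths p =>
          (pvGetDepthA layers (layers.length + 1) p.1 depths).2) d := by
  intro roots
  induction roots with
  | nil => intro _ d _; rfl
  | cons p rest ihr =>
    intro hroots d hInv
    have hk : p.1 ∈ pvElim layers layers.length := hpre.2 p.1 (hroots p (by simp))
    obtain ⟨c, hc, hsim⟩ := pvSimB layers layers.length p.1 hk d hInv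
    obtain ⟨ext, _, _, _, hInv'⟩ := pvGetDepthA_struct layers layers.length p.1 hk d hInv
    have hfuel : pvGetDepthA layers (layers.length + 1) p.1 d
        = pvGetDepthA layers layers.length p.1 d :=
      pvGetDepthA_fuel layers layers.length p.1 hk (layers.length + 1) (by omega) d
    have hstep : pvLoopB layers (pvFuelB layers layers.length) [p.1] d
        = (pvGetDepthA layers layers.length p.1 d).2 := by
      have : pvFuelB layers layers.length = c + (pvFuelB layers layers.length - c) := by omega
      rw [this, hsim [] (pvFuelB layers layers.length - c), pvLoopB_nil]
    simp only [List.foldl_cons]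
    rw [hstep, hfuel]
    exact ihr (fun q hq => hroots q (by simp [hq])) _ hInv'

theorem layer_depths_spec : Claim_equal_layer_depths := by
  intro layers _ hpre
  show layer_depths layers = layer_depths_alt layers
  unfold layer_depths layer_depths_alt
  rw [pvFoldEq layers hpre layers (fun p hp => List.mem_map.mpr ⟨p, hp, rfl⟩)
    PySem.Dict.empty pvInv_empty]
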